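-- pv_equiv track=rewrite | github.com/BrittonHelfert/python-shell | app/parser.py | split_tokens
-- ===== SOURCE A (Python) =====
-- class ParseSyntaxError(Exception):
--     pass
--
-- def split_tokens(line: str) -> list[str]:
--     # Treat quoted strings as one token, otherwise split on spaces
--     res = []
--     curr_token = ""
--     inside_single_quotes = False
--     inside_double_quotes = False
--     escape_next = False
--     for i, char in enumerate(line):
--         if escape_next:
--             curr_token += char
--             escape_next = False
--         elif char == '"':
--             if inside_single_quotes:
--                 curr_token += char
--             else:
--                 inside_double_quotes = not inside_double_quotes
--         elif char == "'":
--             if inside_double_quotes: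
--                 curr_token += char
--             else:
--                 inside_single_quotes = not inside_single_quotes
--         elif char == "\\":
--             if inside_single_quotes:
--                 curr_token += char
--             elif inside_double_quotes:
--                 if i < len(line) - 1 and line[i + 1] in {'"', "\\", "$", "`", "\n"}:
--                     escape_next = True
--                 else:
--                     curr_token += char
--             else:
--                 escape_next = True
--         elif char == " ":
--             if inside_single_quotes or inside_double_quotes:
--                 curr_token += char
--             else:
--                 if curr_token:
--                     res.append(curr_token)
--                     curr_token = ""
--         else:
--             curr_token += char
--     if curr_token:
--         res.append(curr_token)
--     if inside_single_quotes or inside_double_quotes: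
--         raise ParseSyntaxError("unterminated quote")
--     return res
-- ===== SOURCE B (Python) =====
-- class ParseSyntaxError(Exception):
--     pass
--
-- def split_tokens(line: str) -> list[str]:
--     # Index-based scan: inner loops consume whole quoted regions; one persistent token.
--     res = []
--     curr = []
--     i = 0
--     n = len(line)
--     while i < n:
--         c = line[i]
--         if c == ' ':
--             if curr:
--                 res.append(''.join(curr))
--                 curr = []
--             i += 1
--         elif c == '\\':
--             if i + 1 < n:
--                 curr.append(line[i + 1])
--                 i += 2
--             else:
--                 i += 1  # dangling backslash is dropped
--         elif c == "'":
--             i += 1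
--             while True:
--                 if i >= n:
--                     raise ParseSyntaxError("unterminated quote")
--                 if line[i] == "'":
--                     i += 1
--                     break
--                 curr.append(line[i])
--                 i += 1
--         elif c == '"':
--             i += 1
--             while True:
--                 if i >= n:
--                     raise ParseSyntaxError("unterminated quote")
--                 ch = line[i]
--                 if ch == '"':
--                     i += 1
--                     break
--                 if ch == '\\' and i + 1 < n and line[i + 1] in '"\\$`\n':
--                     curr.append(line[i + 1])
--                     i += 2
--                 else:
--                     curr.append(ch)
--                     i += 1
--         else:
--             curr.append(c)
--             i += 1
--     if curr:
--         res.append(''.join(curr))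
--     return res
-- ===== Notes on version B (the rewrite author's own statement) =====
-- stated objective: simpler
-- what changed: Replaces A's five-flag (res/curr/single/double/escape) character state machine by an index-based scan in which dedicated inner loops consume each quoted region wholesale and a dangling backslash/escape is handled by direct lookahead, with one persistent token flushed on unquoted spaces.
import Mathlib
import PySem

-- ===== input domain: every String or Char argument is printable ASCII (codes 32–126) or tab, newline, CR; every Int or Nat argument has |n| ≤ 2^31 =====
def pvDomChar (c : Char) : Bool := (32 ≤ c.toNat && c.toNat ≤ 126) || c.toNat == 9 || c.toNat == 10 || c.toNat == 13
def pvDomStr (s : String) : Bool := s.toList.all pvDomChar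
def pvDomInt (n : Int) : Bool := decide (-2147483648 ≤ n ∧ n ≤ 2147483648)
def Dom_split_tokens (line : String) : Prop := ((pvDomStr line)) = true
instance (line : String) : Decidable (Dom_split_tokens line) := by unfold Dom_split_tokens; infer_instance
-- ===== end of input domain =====

-- B replaces A's boolean-flag single pass by an index-based scan whose inner loops consume
-- whole quoted regions (objective: simpler decomposition; same return values on Pre_).

-- ===== PORT A =====
-- lookahead test of A: i < len(line)-1 and line[i+1] in {'"', "\\", "$", "`", "\n"}
def pvAEsc (rest : List Char) : Bool :=
  match rest with
  | [] => false
  | c :: _ => c = '"' || c = '\\' || c = '$' || c = '`' || c = '\n'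

-- the for-loop of A; state = (res, curr_token, inside_single, inside_double, escape_next)
def pvALoop : List Char → List (List Char) → List Char → Bool → Bool → Bool → List (List Char) × List Char
  | [], res, cur, _, _, _ => (res, cur)
  | c :: rest, res, cur, sq, dq, esc =>
    if esc then pvALoop rest res (cur ++ [c]) sq dq false
    else if c = '"' then
      if sq then pvALoop rest res (cur ++ [c]) sq dq false
      else pvALoop rest res cur sq (!dq) false
    else if c = '\'' then
      if dq then pvALoop rest res (cur ++ [c]) sq dq false
      else pvALoop rest res cur (!sq) dq false
    else if c = '\\' then
      if sq then pvALoop rest res (cur ++ [c]) sq dq false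
      else if dq then
        if pvAEsc rest then pvALoop rest res cur sq dq true
        else pvALoop rest res (cur ++ [c]) sq dq false
      else pvALoop rest res cur sq dq true
    else if c = ' ' then
      if sq || dq then pvALoop rest res (cur ++ [c]) sq dq false
      else if cur ≠ [] then pvALoop rest (res ++ [cur]) [] sq dq false
      else pvALoop rest res cur sq dq false
    else pvALoop rest res (cur ++ [c]) sq dq false

-- the raising final states (inside a quote at end) are excluded by Pre_
def split_tokens (line : String) : List String :=
  match pvALoop line.toList [] [] false false false with
  | (res, cur) => (if cur ≠ [] then res ++ [cur] else res).map String.mk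

-- ===== PORT B =====
def pvBDEsc (c : Char) : Bool := c = '"' || c = '\\' || c = '$' || c = '`' || c = '\n'

-- inner while loop of B for a single-quoted region:
-- (token-so-far, some rest) on the closing quote, (token-so-far, none) on unterminated quote (B raises)
def pvSLoop : List Char → List Char → List Char × Option (List Char)
  | acc, [] => (acc, none)
  | acc, c :: r => if c = '\'' then (acc, some r) else pvSLoop (acc ++ [c]) r

-- inner while loop of B for a double-quoted region (a trailing backslash is kept, then the end raises)
def pvDLoop : List Char → List Char → List Char × Option (List Char)
  | acc, [] => (acc, none)
  | acc, [c] => if c = '"' then (acc, some []) else (acc ++ [c], none)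
  | acc, c :: c2 :: r2 =>
    if c = '"' then (acc, some (c2 :: r2))
    else if c = '\\' then
      if pvBDEsc c2 then pvDLoop (acc ++ [c2]) r2 else pvDLoop (acc ++ [c]) (c2 :: r2)
    else pvDLoop (acc ++ [c]) (c2 :: r2)

-- length-based strong induction, used by the termination proof of pvBLoop and the proofs below
theorem pvStrongLen {α : Type} {motive : List α → Prop}
    (ind : ∀ l : List α, (∀ t : List α, t.length < l.length → motive t) → motive l) :
    ∀ l : List α, motive l := by
  have key : ∀ (n : Nat) (t : List α), t.length ≤ n → motive t := by
    intro n
    induction n with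
    | zero => intro t ht; exact ind t (fun t' h => by omega)
    | succ n ihn => intro t ht; exact ind t (fun t' h => ihn t' (by omega))
  intro l
  exact key l.length l le_rfl

theorem pvSLoop_len : ∀ (l acc a r : List Char), pvSLoop acc l = (a, some r) → r.length < l.length := by
  intro l
  induction l with
  | nil => intro acc a r h; simp [pvSLoop] at h
  | cons c t ih =>
    intro acc a r h
    simp only [pvSLoop] at h
    split at h
    · cases h; simp
    · exact Nat.lt_trans (ih _ _ _ h) (by simp)

theorem pvDLoop_len : ∀ (l acc a r : List Char), pvDLoop acc l = (a, some r) → r.length < l.length := by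
  intro l
  induction l using pvStrongLen with
  | ind l ih =>
    intro acc a r h
    match l with
    | [] => simp [pvDLoop] at h
    | [c] =>
      simp only [pvDLoop] at h
      split at h
      · cases h; simp
      · simp at h
    | c :: c2 :: r2 =>
      simp only [pvDLoop] at h
      split at h
      · cases h; simp
      · split at h
        · split at h
          · have := ih r2 (by simp) _ _ _ h; simp only [List.length_cons] at this ⊢; omega
          · have := ih (c2 :: r2) (by simp) _ _ _ h; simp only [List.length_cons] at this ⊢; omega
        · have := ih (c2 :: r2) (by simp) _ _ _ h; simp only [List.length_cons] at this ⊢; omega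

-- outer loop of B: on a quote character, hand the shared curr_token to the inner loop
def pvBLoop : List Char → List (List Char) → List Char → List (List Char)
  | [], res, cur => if cur ≠ [] then res ++ [cur] else res
  | c :: rest, res, cur =>
    if c = ' ' then
      if cur ≠ [] then pvBLoop rest (res ++ [cur]) [] else pvBLoop rest res []
    else if c = '\\' then
      match rest with
      | c2 :: r2 => pvBLoop r2 res (cur ++ [c2])
      | [] => pvBLoop [] res cur
    else if c = '\'' then
      match h : pvSLoop cur rest with
      | (acc, some r) => pvBLoop r res acc
      | (acc, none) => if acc ≠ [] then res ++ [acc] else res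
    else if c = '"' then
      match h : pvDLoop cur rest with
      | (acc, some r) => pvBLoop r res acc
      | (acc, none) => if acc ≠ [] then res ++ [acc] else res
    else pvBLoop rest res (cur ++ [c])
termination_by l _ _ => l.length
decreasing_by
  all_goals simp_all
  all_goals first
    | (have := pvSLoop_len _ _ _ _ h; omega)
    | (have := pvDLoop_len _ _ _ _ h; omega)

def split_tokens_alt (line : String) : List String :=
  (pvBLoop line.toList [] []).map String.mk

-- ===== PRECONDITION & SPEC =====
-- Pre_ excludes exactly the lines ending inside an (unescaped) quote, on which the Python A
-- raises ParseSyntaxError("unterminated quote"): quote state 0/1/2 = outside/single/double.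
def pvQS : List Char → Nat → Nat
  | [], q => q
  | [c], 0 => if c = '\'' then 1 else if c = '"' then 2 else 0
  | [c], 1 => if c = '\'' then 0 else 1
  | [c], q + 2 => if c = '"' then 0 else q + 2
  | c :: c2 :: r, 0 =>
    if c = '\'' then pvQS (c2 :: r) 1
    else if c = '"' then pvQS (c2 :: r) 2
    else if c = '\\' then pvQS r 0
    else pvQS (c2 :: r) 0
  | c :: c2 :: r, 1 => if c = '\'' then pvQS (c2 :: r) 0 else pvQS (c2 :: r) 1
  | c :: c2 :: r, q + 2 =>
    if c = '"' then pvQS (c2 :: r) 0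
    else if c = '\\' then
      if c2 = '"' ∨ c2 = '\\' ∨ c2 = '$' ∨ c2 = '`' ∨ c2 = '\n' then pvQS r (q + 2) else pvQS (c2 :: r) (q + 2)
    else pvQS (c2 :: r) (q + 2)

def Pre_split_tokens (line : String) : Prop := pvQS line.toList 0 = 0
instance (line : String) : Decidable (Pre_split_tokens line) := by unfold Pre_split_tokens; infer_instance

def pvWitness_split_tokens : String := "ab 'c  d' \"x\\\"y\" z"

def Spec_split_tokens (line : String) (out : List String) : Prop := out = split_tokens_alt line
instance (line : String) (out : List String) : Decidable (Spec_split_tokens line out) := by unfold Spec_split_tokens; infer_instance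

-- ===== CLAIM (what is proved, stated in full; the proofs are below) =====
def Claim_equal_split_tokens : Prop := ∀ (line : String), Dom_split_tokens line → Pre_split_tokens line → Spec_split_tokens line (split_tokens line)

-- ===== LEMMAS AND PROOFS =====

-- the "flush curr_token at end" step, shared shape of both ports' results
def pvFlush (res : List (List Char)) (cur : List Char) : List (List Char) :=
  if cur ≠ [] then res ++ [cur] else res

-- A's loop followed by the final flush
def pvARun (l : List Char) (res : List (List Char)) (cur : List Char) (sq dq esc : Bool) : List (List Char) :=
  match pvALoop l res cur sq dq esc with
  | (r, c) => pvFlush r c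

-- inside single quotes A appends every char until the closing quote: matches pvSLoop
theorem lemS : ∀ (l cur : List Char) (res : List (List Char)),
    pvARun l res cur true false false =
      (match pvSLoop cur l with
       | (acc, some r) => pvARun r res acc false false false
       | (acc, none) => pvFlush res acc) := by
  intro l
  induction l with
  | nil => intro cur res; rfl
  | cons c t ih =>
    intro cur res
    by_cases hq : c = '\''
    · subst hq
      simp [pvARun, pvALoop, pvSLoop]
    · have h1 : pvSLoop cur (c :: t) = pvSLoop (cur ++ [c]) t := by
        simp [pvSLoop, hq]
      have h2 : pvARun (c :: t) res cur true false false = pvARun t res (cur ++ [c]) true false false := by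
        simp only [pvARun, pvALoop]
        split_ifs <;> simp_all
      rw [h1, h2, ih]

-- inside double quotes A's escape/lookahead behaviour matches pvDLoop
theorem lemD : ∀ (l cur : List Char) (res : List (List Char)),
    pvARun l res cur false true false =
      (match pvDLoop cur l with
       | (acc, some r) => pvARun r res acc false false false
       | (acc, none) => pvFlush res acc) := by
  intro l
  induction l using pvStrongLen with
  | ind l ih =>
    intro cur res
    match l with
    | [] => rfl
    | [c] =>
      by_cases hdq : c = '"'
      · subst hdq
        simp [pvARun, pvALoop, pvDLoop]
      · have hD : pvDLoop cur [c] = (cur ++ [c], none) := by simp [pvDLoop, hdq]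
        have hA : pvARun [c] res cur false true false = pvFlush res (cur ++ [c]) := by
          simp only [pvARun, pvALoop, pvAEsc]
          split_ifs <;> simp_all [pvFlush]
        rw [hA, hD]
    | c :: c2 :: r2 =>
      by_cases hdq : c = '"'
      · subst hdq
        simp [pvARun, pvALoop, pvDLoop]
      · by_cases hbs : c = '\\'
        · subst hbs
          by_cases he : pvBDEsc c2 = true
          · have hA : pvARun ('\\' :: c2 :: r2) res cur false true false =
                pvARun r2 res (cur ++ [c2]) false true false := by
              simp only [pvARun, pvALoop, pvAEsc]
              simp only [pvBDEsc] at he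
              simp_all
            have hB : pvDLoop cur ('\\' :: c2 :: r2) = pvDLoop (cur ++ [c2]) r2 := by
              simp [pvDLoop, he]
            rw [hA, hB, ih r2 (by simp)]
          · have hA : pvARun ('\\' :: c2 :: r2) res cur false true false =
                pvARun (c2 :: r2) res (cur ++ ['\\']) false true false := by
              simp only [pvARun, pvALoop, pvAEsc]
              simp only [pvBDEsc] at he
              simp_all
            have hB : pvDLoop cur ('\\' :: c2 :: r2) = pvDLoop (cur ++ ['\\']) (c2 :: r2) := by
              simp [pvDLoop, he]
            rw [hA, hB, ih (c2 :: r2) (by simp)]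
        · have h1 : pvDLoop cur (c :: c2 :: r2) = pvDLoop (cur ++ [c]) (c2 :: r2) := by
            simp [pvDLoop, hdq, hbs]
          have h2 : pvARun (c :: c2 :: r2) res cur false true false =
              pvARun (c2 :: r2) res (cur ++ [c]) false true false := by
            by_cases hq : c = '\''
            · subst hq; simp [pvARun, pvALoop]
            · by_cases hs : c = ' '
              · subst hs; simp [pvARun, pvALoop]
              · simp [pvARun, pvALoop, hdq, hbs, hq, hs]
          rw [h1, h2, ih (c2 :: r2) (by simp)]

-- the outer loops agree (for every input string)
theorem lemMain : ∀ (l : List Char) (res : List (List Char)) (cur : List Char),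
    pvARun l res cur false false false = pvBLoop l res cur := by
  intro l
  induction l using pvStrongLen with
  | ind l ih =>
    intro res cur
    match l with
    | [] => simp [pvARun, pvALoop, pvBLoop, pvFlush]
    | c :: t =>
      by_cases hsp : c = ' '
      · subst hsp
        have hA : pvARun (' ' :: t) res cur false false false =
            (if cur ≠ [] then pvARun t (res ++ [cur]) [] false false false
             else pvARun t res cur false false false) := by
          simp only [pvARun, pvALoop]
          split_ifs <;> simp_all
        have hB : pvBLoop (' ' :: t) res cur =
            (if cur ≠ [] then pvBLoop t (res ++ [cur]) [] else pvBLoop t res []) := by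
          rw [pvBLoop.eq_def]
          simp
        rw [hA, hB]
        by_cases hc : cur = []
        · simp [hc, ih t (by simp)]
        · simp [hc, ih t (by simp)]
      · by_cases hbs : c = '\\'
        · subst hbs
          match t with
          | [] =>
            have hB : pvBLoop ['\\'] res cur = pvBLoop [] res cur := by
              rw [pvBLoop.eq_def]; simp
            rw [hB]
            simp [pvARun, pvALoop, pvBLoop, pvFlush]
          | c2 :: r2 =>
            have hA : pvARun ('\\' :: c2 :: r2) res cur false false false =
                pvARun r2 res (cur ++ [c2]) false false false := by
              simp [pvARun, pvALoop]
            have hB : pvBLoop ('\\' :: c2 :: r2) res cur = pvBLoop r2 res (cur ++ [c2]) := by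
              rw [pvBLoop.eq_def]; simp
            rw [hA, hB, ih r2 (by simp)]
        · by_cases hsq : c = '\''
          · subst hsq
            have hA : pvARun ('\'' :: t) res cur false false false =
                pvARun t res cur true false false := by
              simp [pvARun, pvALoop]
            rw [hA, lemS, pvBLoop.eq_def]
            simp only [if_neg (by decide : ¬('\'' = ' ')), if_neg (by decide : ¬('\'' = '\\'))]
            rcases hS : pvSLoop cur t with ⟨acc, _ | r⟩
            · simp [pvFlush]
            · simp only []
              exact ih r (Nat.lt_trans (pvSLoop_len _ _ _ _ hS) (by simp)) res acc
          · by_cases hdq : c = '"'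
            · subst hdq
              have hA : pvARun ('"' :: t) res cur false false false =
                  pvARun t res cur false true false := by
                simp [pvARun, pvALoop]
              rw [hA, lemD, pvBLoop.eq_def]
              simp only [if_neg (by decide : ¬('"' = ' ')), if_neg (by decide : ¬('"' = '\\')),
                if_neg (by decide : ¬('"' = '\''))]
              rcases hD : pvDLoop cur t with ⟨acc, _ | r⟩
              · simp [pvFlush]
              · simp only []
                exact ih r (Nat.lt_trans (pvDLoop_len _ _ _ _ hD) (by simp)) res acc
            · have hA : pvARun (c :: t) res cur false false false =
                  pvARun t res (cur ++ [c]) false false false := by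
                simp only [pvARun, pvALoop]
                split_ifs <;> simp_all
              have hB : pvBLoop (c :: t) res cur = pvBLoop t res (cur ++ [c]) := by
                rw [pvBLoop.eq_def]
                simp [hsp, hbs, hsq, hdq]
              rw [hA, hB, ih t (by simp)]

theorem split_tokens_eq (line : String) : split_tokens line = split_tokens_alt line := by
  unfold split_tokens split_tokens_alt
  rw [← lemMain]
  rcases hA : pvALoop line.toList [] [] false false false with ⟨r, c⟩
  simp [pvARun, pvFlush, hA]

-- ===== VERDICT (by name: the statement is the Claim_ definition above) =====
theorem split_tokens_spec : Claim_equal_split_tokens := by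
  intro line _ _
  unfold Spec_split_tokens
  exact split_tokens_eq line
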